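-- pv_equiv track=rewrite | github.com/YimJiYoung/Daily-DataStructure-Algorithm | Algorithm/Greedy/문자열뒤집기.py | solutioin
-- ===== SOURCE A (Python) =====
-- def solutioin(nums):
--     length = len(nums)
--
--     if length == 0:
--         return 0
--
--     group_count = [0] * 2
--
--     for i in range(1, length):
--         if nums[i] != nums[i - 1]:
--             group_count[nums[i - 1]] += 1
--     group_count[nums[-1]] += 1
--
--     return min(group_count)
-- ===== SOURCE B (Python) =====
-- def solutioin(nums):
--     # Divide and conquer: tally one bump per maximal run of each half, then
--     # cancel the double count when a run spans the cut.
--     group_count = [0, 0]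
--
--     def tally(lo, hi):
--         if hi - lo == 1:
--             group_count[nums[lo]] += 1
--         elif hi - lo >= 2:
--             mid = (lo + hi) // 2
--             tally(lo, mid)
--             tally(mid, hi)
--             if nums[mid - 1] == nums[mid]:
--                 group_count[nums[mid]] -= 1  # the run spanning the cut was counted twice
--
--     if nums:
--         tally(0, len(nums))
--     return min(group_count)
-- ===== Notes on version B (the rewrite author's own statement) =====
-- stated objective: alternative
-- what changed: B replaces A's left-to-right boundary scan (bump group_count[nums[i-1]] at each run end, then patch in the final element) by a divide-and-conquer tally: each half of the index range contributes one bump per maximal run and a run spanning the cut is cancelled once; same 2-slot table, a genuinely different traversal.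
import Mathlib
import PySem

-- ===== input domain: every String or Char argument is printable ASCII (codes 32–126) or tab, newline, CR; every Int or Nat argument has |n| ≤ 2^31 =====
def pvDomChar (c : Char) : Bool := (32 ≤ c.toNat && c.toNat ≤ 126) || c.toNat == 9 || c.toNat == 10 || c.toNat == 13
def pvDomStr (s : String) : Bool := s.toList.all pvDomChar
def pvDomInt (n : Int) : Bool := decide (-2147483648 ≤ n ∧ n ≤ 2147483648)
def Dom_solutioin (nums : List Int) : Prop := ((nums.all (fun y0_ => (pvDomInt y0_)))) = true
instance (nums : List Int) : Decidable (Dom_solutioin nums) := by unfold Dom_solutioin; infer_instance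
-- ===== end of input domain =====

-- B replaces A's left-to-right boundary scan (bump group_count[v] at each run end,
-- patch in the final element) by a divide-and-conquer tally: each half contributes one
-- bump per maximal run and a run spanning the cut is cancelled once; same table, a
-- genuinely different traversal.

-- ===== PORT A =====
-- group_count[k] += 1 on the 2-element list, Python negative indexing included;
-- total forms pyGetD/pySetD are exact because Pre_ keeps every bumped key in range.
def pyBumpA (g : List Int) (k : Int) : List Int :=
  PySem.List.pySetD g k (PySem.List.pyGetD g k 0 + 1)

def solutioin (nums : List Int) : Int :=
  let length := PySem.List.len nums
  if length = 0 then 0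
  else
    let g1 := (PySem.List.pyRange 1 length 1).foldl
      (fun g i =>
        if PySem.List.pyGetD nums i 0 ≠ PySem.List.pyGetD nums (i - 1) 0 then
          pyBumpA g (PySem.List.pyGetD nums (i - 1) 0)
        else g)
      (List.replicate 2 0)
    let g2 := pyBumpA g1 (PySem.List.pyGetD nums (-1) 0)
    -- min(group_count) over the two entries
    min (PySem.List.pyGetD g2 0 0) (PySem.List.pyGetD g2 1 0)

-- ===== PORT B =====
-- group_count[k] += 1 and group_count[k] -= 1, as in Source B's tally
def pyBumpB (g : List Int) (k : Int) : List Int :=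
  PySem.List.pySetD g k (PySem.List.pyGetD g k 0 + 1)
def pyDropB (g : List Int) (k : Int) : List Int :=
  PySem.List.pySetD g k (PySem.List.pyGetD g k 0 - 1)

-- Source B's recursive tally(lo, hi), mutating group_count ported as state passing;
-- fuel = a structural bound on the recursion depth (hi - lo shrinks at every call),
-- only to make the same computation total
def tallyB (nums : List Int) (fuel : Nat) (lo hi : Int) (g : List Int) : List Int :=
  match fuel with
  | 0 => g
  | fuel + 1 =>
    if hi - lo = 1 then
      pyBumpB g (PySem.List.pyGetD nums lo 0)
    else if 2 ≤ hi - lo then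
      -- mid = (lo + hi) // 2; g1/g2 = group_count after the two recursive calls
      if PySem.List.pyGetD nums (PySem.Int.floordiv (lo + hi) 2 - 1) 0
          = PySem.List.pyGetD nums (PySem.Int.floordiv (lo + hi) 2) 0 then
        pyDropB
          (tallyB nums fuel (PySem.Int.floordiv (lo + hi) 2) hi
            (tallyB nums fuel lo (PySem.Int.floordiv (lo + hi) 2) g))
          (PySem.List.pyGetD nums (PySem.Int.floordiv (lo + hi) 2) 0)
      else
        tallyB nums fuel (PySem.Int.floordiv (lo + hi) 2) hi
          (tallyB nums fuel lo (PySem.Int.floordiv (lo + hi) 2) g)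
    else g

def solutioin_alt (nums : List Int) : Int :=
  let g := if nums ≠ [] then tallyB nums nums.length 0 (PySem.List.len nums) [0, 0] else [0, 0]
  min (PySem.List.pyGetD g 0 0) (PySem.List.pyGetD g 1 0)

-- ===== PRECONDITION & SPEC =====
-- Pre_ = exactly the inputs where Python A returns: any element outside -2..1 is the
-- value of some maximal run, hence eventually used as an index into the 2-element
-- group_count and raises IndexError (B's tally raises there too).
def Pre_solutioin (nums : List Int) : Prop := ∀ x ∈ nums, -2 ≤ x ∧ x ≤ 1
instance (nums : List Int) : Decidable (Pre_solutioin nums) := by unfold Pre_solutioin; infer_instance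
def pvWitness_solutioin : List Int := [1, 0, 0, 1, 1]

def Spec_solutioin (nums : List Int) (out : Int) : Prop := out = solutioin_alt nums
instance (nums : List Int) (out : Int) : Decidable (Spec_solutioin nums out) := by unfold Spec_solutioin; infer_instance

-- ===== CLAIM (what is proved, stated in full; the proofs are below) =====
def Claim_equal_solutioin : Prop := ∀ (nums : List Int), Dom_solutioin nums → Pre_solutioin nums → Spec_solutioin nums (solutioin nums)

-- ===== LEMMAS AND PROOFS =====

-- The (current, previous) pairs read through indices i = 1 .. len-1 are the zip of the tail with the list.
lemma map_adj_zip (x : Int) (xs : List Int) :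
    (PySem.List.pyRange 1 ((x :: xs).length : Int) 1).map
      (fun i => (PySem.List.pyGetD (x :: xs) i 0, PySem.List.pyGetD (x :: xs) (i - 1) 0))
    = xs.zip (x :: xs) := by
  apply List.ext_getElem
  · simp [PySem.List.length_pyRange_one]
  · intro k h1 h2
    have hk : k < xs.length := by
      simpa [PySem.List.length_pyRange_one] using h1
    simp only [List.getElem_map, PySem.List.getElem_pyRange_one, List.getElem_zip]
    have e2 : (1 : Int) + (k : Int) - 1 = ((k : Nat) : Int) := by ring
    have e1 : (1 : Int) + (k : Int) = ((k + 1 : Nat) : Int) := by push_cast; ring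
    rw [e2, e1, PySem.List.pyGetD_natCast, PySem.List.pyGetD_natCast]
    rw [List.getD_eq_getElem _ _ (by simpa using Nat.succ_lt_succ hk),
        List.getD_eq_getElem _ _ (by simp; omega)]
    simp

-- A's boundary fold plus the final bump equals one bump per run START (head, then each
-- boundary's current element).
lemma adj_fold_eq_filterMap (bump : List Int → Int → List Int) :
    ∀ (rest : List Int) (x : Int) (g : List Int),
      bump ((rest.zip (x :: rest)).foldl (fun g p => if p.1 ≠ p.2 then bump g p.2 else g) g)
          ((x :: rest).getLast (List.cons_ne_nil x rest))
      = ((rest.zip (x :: rest)).filterMap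
            (fun p => if p.1 ≠ p.2 then some p.1 else none)).foldl bump (bump g x) := by
  intro rest
  induction rest with
  | nil => intro x g; simp
  | cons y t ih =>
    intro x g
    have hlast : (x :: y :: t).getLast (List.cons_ne_nil x (y :: t))
        = (y :: t).getLast (List.cons_ne_nil y t) := by
      simp [List.getLast_cons]
    by_cases h : y = x
    · subst h
      simpa [hlast, List.zip_cons_cons, List.filterMap_cons] using ih y g
    · simp only [List.zip_cons_cons, List.foldl_cons, List.filterMap_cons, hlast]
      rw [if_pos (by exact h), if_pos (by exact h)]
      simpa using ih y (bump g x)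

lemma Afold_eq (x : Int) (xs : List Int) (g0 : List Int) :
    (PySem.List.pyRange 1 ((x :: xs).length : Int) 1).foldl
      (fun g i =>
        if PySem.List.pyGetD (x :: xs) i 0 ≠ PySem.List.pyGetD (x :: xs) (i - 1) 0 then
          pyBumpA g (PySem.List.pyGetD (x :: xs) (i - 1) 0)
        else g) g0
    = (xs.zip (x :: xs)).foldl (fun g p => if p.1 ≠ p.2 then pyBumpA g p.2 else g) g0 := by
  rw [← map_adj_zip x xs, List.foldl_map]

-- One bump of the 2-slot table by a value in -2..1: slot 1 iff the value is odd.
lemma bump_step (a b v : Int) (h : -2 ≤ v ∧ v ≤ 1) :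
    pyBumpA [a, b] v = if PySem.Int.mod v 2 = 1 then [a, b + 1] else [a + 1, b] := by
  have : v = -2 ∨ v = -1 ∨ v = 0 ∨ v = 1 := by omega
  rcases this with h | h | h | h <;> subst h <;>
    simp [pyBumpA, PySem.List.pySetD, PySem.List.pySet?, PySem.List.pyIdx?,
          PySem.List.pyGetD, PySem.List.pyGet?, PySem.Int.mod]

-- One decrement of the 2-slot table by a value in -2..1.
lemma drop_step (a b v : Int) (h : -2 ≤ v ∧ v ≤ 1) :
    pyDropB [a, b] v = if PySem.Int.mod v 2 = 1 then [a, b - 1] else [a - 1, b] := by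
  have : v = -2 ∨ v = -1 ∨ v = 0 ∨ v = 1 := by omega
  rcases this with h | h | h | h <;> subst h <;>
    simp [pyDropB, PySem.List.pySetD, PySem.List.pySet?, PySem.List.pyIdx?,
          PySem.List.pyGetD, PySem.List.pyGet?, PySem.Int.mod]

-- Folding bumps over a list of in-range values fills the table with
-- (evens, odds) added onto the start state.
lemma bump_fold (reps : List Int) (h : ∀ v ∈ reps, -2 ≤ v ∧ v ≤ 1) (a b : Int) :
    reps.foldl pyBumpA [a, b]
    = [a + ((reps.length : Int) - (reps.map (fun v => PySem.Int.mod v 2)).sum),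
       b + (reps.map (fun v => PySem.Int.mod v 2)).sum] := by
  induction reps generalizing a b with
  | nil => simp
  | cons v t ih =>
    have hv := h v (by simp)
    have hm : PySem.Int.mod v 2 = 0 ∨ PySem.Int.mod v 2 = 1 := by
      have : v = -2 ∨ v = -1 ∨ v = 0 ∨ v = 1 := by omega
      rcases this with h | h | h | h <;> subst h <;> decide
    have ht : ∀ v ∈ t, -2 ≤ v ∧ v ≤ 1 := fun w hw => h w (by simp [hw])
    rw [List.foldl_cons, bump_step a b v hv]
    rcases hm with hm | hm
    · rw [hm, if_neg (by norm_num), ih ht]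
      simp only [List.map_cons, List.sum_cons, List.length_cons, hm, List.cons.injEq,
        and_true]
      refine ⟨by push_cast; ring, by ring⟩
    · rw [hm, if_pos rfl, ih ht]
      simp only [List.map_cons, List.sum_cons, List.length_cons, hm, List.cons.injEq,
        and_true]
      refine ⟨by push_cast; ring, by ring⟩

-- Dropping one copy of w after bumping it and a trail of in-range values cancels the bump.
lemma drop_cancel (w : Int) (hw : -2 ≤ w ∧ w ≤ 1) (t : List Int)
    (ht : ∀ v ∈ t, -2 ≤ v ∧ v ≤ 1) (a b : Int) :
    pyDropB (t.foldl pyBumpA (pyBumpA [a, b] w)) w = t.foldl pyBumpA [a, b] := by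
  rw [bump_step a b w hw]
  have hm : PySem.Int.mod w 2 = 0 ∨ PySem.Int.mod w 2 = 1 := by
    have : w = -2 ∨ w = -1 ∨ w = 0 ∨ w = 1 := by omega
    rcases this with h | h | h | h <;> subst h <;> decide
  rcases hm with hm | hm
  · rw [hm, if_neg (by norm_num), bump_fold t ht (a + 1) b, bump_fold t ht a b,
      drop_step _ _ w hw, hm, if_neg (by norm_num)]
    simp only [List.cons.injEq, and_true]
    omega
  · rw [hm, if_pos rfl, bump_fold t ht a (b + 1), bump_fold t ht a b,
      drop_step _ _ w hw, hm, if_pos rfl]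
    simp only [List.cons.injEq, and_true]
    exact ⟨trivial, by omega⟩

-- One representative value per maximal run (the run's last element; the value sequence
-- is one entry per run either way).
def collapse : List Int → List Int
  | [] => []
  | [x] => [x]
  | x :: y :: t => if x = y then collapse (y :: t) else x :: collapse (y :: t)

lemma collapse_cons₂ (x y : Int) (t : List Int) :
    collapse (x :: y :: t) = if x = y then collapse (y :: t) else x :: collapse (y :: t) := rfl

lemma collapse_subset : ∀ (l : List Int) (x : Int), x ∈ collapse l → x ∈ l := by
  intro l
  induction l with
  | nil => intro x h; simp [collapse] at h
  | cons a l ih =>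
    intro x h
    cases l with
    | nil => simpa [collapse] using h
    | cons b t =>
      rw [collapse_cons₂] at h
      by_cases hab : a = b
      · rw [if_pos hab] at h
        exact List.mem_cons_of_mem a (ih x h)
      · rw [if_neg hab] at h
        rcases List.mem_cons.mp h with h | h
        · simp [h]
        · exact List.mem_cons_of_mem a (ih x h)

lemma collapse_cons : ∀ (xs : List Int) (x : Int), ∃ t, collapse (x :: xs) = x :: t := by
  intro xs
  induction xs with
  | nil => intro x; exact ⟨[], rfl⟩
  | cons y t ih =>
    intro x
    rw [collapse_cons₂]
    by_cases h : x = y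
    · subst h; rw [if_pos rfl]; exact ih x
    · rw [if_neg h]; exact ⟨collapse (y :: t), rfl⟩

-- Collapsing a concatenation: the right part loses its first representative exactly
-- when a run spans the seam.
lemma collapse_append : ∀ (u v : List Int) (hu : u ≠ []) (hv : v ≠ []),
    collapse (u ++ v)
    = collapse u ++ (if u.getLast hu = v.head hv then (collapse v).tail else collapse v) := by
  intro u
  induction u with
  | nil => intro v hu; exact absurd rfl hu
  | cons x u' ih =>
    intro v hu hv
    cases u' with
    | nil =>
      cases v with
      | nil => exact absurd rfl hv
      | cons y t =>
        simp only [List.cons_append, List.nil_append, List.getLast_singleton, List.head_cons]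
        rw [collapse_cons₂]
        obtain ⟨t', ht'⟩ := collapse_cons t y
        by_cases h : x = y
        · rw [if_pos h, if_pos h, ht']
          simp [collapse, h]
        · rw [if_neg h, if_neg h]
          simp [collapse]
    | cons z w =>
      have hzw : (z :: w) ++ v ≠ [] := by simp
      have hlast : (x :: z :: w).getLast hu = (z :: w).getLast (List.cons_ne_nil z w) := by
        simp [List.getLast_cons]
      have hstep : (x :: z :: w) ++ v = x :: z :: (w ++ v) := by simp
      rw [hstep, collapse_cons₂, collapse_cons₂]
      have ihv := ih v (List.cons_ne_nil z w) hv
      have hcons : z :: (w ++ v) = (z :: w) ++ v := by simp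
      by_cases h : x = z
      · rw [if_pos h, if_pos h, hcons, ihv, hlast]
      · rw [if_neg h, if_neg h, hcons, ihv, hlast]
        simp

-- collapse written as A reads the runs: head plus one entry per boundary.
lemma collapse_eq_filterMap : ∀ (xs : List Int) (x : Int),
    collapse (x :: xs)
    = x :: (xs.zip (x :: xs)).filterMap (fun p => if p.1 ≠ p.2 then some p.1 else none) := by
  intro xs
  induction xs with
  | nil => intro x; rfl
  | cons y t ih =>
    intro x
    rw [collapse_cons₂, List.zip_cons_cons, List.filterMap_cons]
    by_cases h : x = y
    · rw [if_pos h, ih y]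
      simp [h]
    · rw [if_neg h]
      rw [ih y]
      simp [Ne.symm h]

lemma take_drop_getLast (nums : List Int) (s n : Nat) (hn : 0 < n) (h : s + n ≤ nums.length) :
    ∀ (hne : ((nums.drop s).take n) ≠ []),
      ((nums.drop s).take n).getLast hne = nums[s + n - 1]'(by omega) := by
  intro hne
  rw [List.getLast_eq_getElem hne]
  have hlen : ((nums.drop s).take n).length = n := by
    simp only [List.length_take, List.length_drop]; omega
  simp only [List.getElem_take, List.getElem_drop]
  exact getElem_congr (c := nums) rfl (by omega) (by omega)

lemma take_drop_head (nums : List Int) (s n : Nat) (h : s < nums.length) :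
    ∀ (hne : ((nums.drop s).take n) ≠ []), ((nums.drop s).take n).head hne = nums[s]'h := by
  intro hne
  rw [List.head_eq_getElem hne]
  simp only [List.getElem_take, List.getElem_drop]
  exact getElem_congr (c := nums) rfl (by omega) h

-- The heart of the equivalence: B's divide-and-conquer tally over [lo, hi) is one bump
-- per maximal run of the corresponding sublist, in order.
lemma tallyB_eq (nums : List Int) (hpre : ∀ x ∈ nums, -2 ≤ x ∧ x ≤ 1) :
    ∀ (fuel : Nat) (lo hi : Int), (hi - lo).toNat ≤ fuel → 0 ≤ lo → lo < hi →
      hi ≤ (nums.length : Int) → ∀ (a b : Int),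
      tallyB nums fuel lo hi [a, b]
        = (collapse ((nums.drop lo.toNat).take (hi - lo).toNat)).foldl pyBumpA [a, b] := by
  intro fuel
  induction fuel with
  | zero => intro lo hi hk h0 hlh; exfalso; omega
  | succ f ih =>
  intro lo hi hk h0 hlh hhi a b
  rw [tallyB]
  by_cases h1 : hi - lo = 1
  · rw [if_pos h1]
    have hlt : lo.toNat < nums.length := by omega
    have hget : PySem.List.pyGetD nums lo 0 = nums[lo.toNat] :=
      PySem.List.pyGetD_eq_getElem nums 0 h0 (by omega)
    have hone : ((1 : Int)).toNat = 1 := rfl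
    have hsub : (nums.drop lo.toNat).take (hi - lo).toNat = [nums[lo.toNat]] := by
      rw [h1, hone, List.take_one, List.head?_drop, List.getElem?_eq_getElem hlt]
      rfl
    rw [hsub, hget]
    rfl
  · by_cases h2 : 2 ≤ hi - lo
    · rw [if_neg h1, if_pos h2]
      have hq := PySem.Int.floordiv_mul_add_mod (lo + hi) 2
      have hm0 := PySem.Int.mod_nonneg (a := lo + hi) (b := 2) (by norm_num)
      have hm1 := PySem.Int.mod_lt (a := lo + hi) (b := 2) (by norm_num)
      set mid := PySem.Int.floordiv (lo + hi) 2 with hmid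
      have hb1 : lo < mid := by omega
      have hb2 : mid < hi := by omega
      set u := (nums.drop lo.toNat).take (mid - lo).toNat with hu
      set v := (nums.drop mid.toNat).take (hi - mid).toNat with hv
      have hsplit : (nums.drop lo.toNat).take (hi - lo).toNat = u ++ v := by
        rw [hu, hv]
        have e : (hi - lo).toNat = (mid - lo).toNat + (hi - mid).toNat := by omega
        rw [e, List.take_add, List.drop_drop]
        have e2 : lo.toNat + (mid - lo).toNat = mid.toNat := by omega
        rw [e2]
      have hulen : u.length = (mid - lo).toNat := by
        rw [hu]; simp only [List.length_take, List.length_drop]; omega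
      have hvlen : v.length = (hi - mid).toNat := by
        rw [hv]; simp only [List.length_take, List.length_drop]; omega
      have hune : u ≠ [] := List.ne_nil_of_length_pos (by omega)
      have hvne : v ≠ [] := List.ne_nil_of_length_pos (by omega)
      have hmidlt : mid.toNat < nums.length := by omega
      have hmid1lt : (mid - 1).toNat < nums.length := by omega
      have hlast : u.getLast hune = nums[(mid - 1).toNat] := by
        refine (take_drop_getLast nums lo.toNat (mid - lo).toNat (by omega) (by omega)
          hune).trans ?_
        exact getElem_congr (c := nums) rfl (by omega) (by omega)
      have hhead : v.head hvne = nums[mid.toNat] :=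
        take_drop_head nums mid.toNat (hi - mid).toNat hmidlt hvne
      have hg1 : PySem.List.pyGetD nums (mid - 1) 0 = nums[(mid - 1).toNat] :=
        PySem.List.pyGetD_eq_getElem nums 0 (by omega) (by omega)
      have hg2 : PySem.List.pyGetD nums mid 0 = nums[mid.toNat] :=
        PySem.List.pyGetD_eq_getElem nums 0 (by omega) (by omega)
      have humem : ∀ w ∈ u, -2 ≤ w ∧ w ≤ 1 := by
        intro w hw
        rw [hu] at hw
        exact hpre w (List.mem_of_mem_drop (List.mem_of_mem_take hw))
      have hvmem : ∀ w ∈ v, -2 ≤ w ∧ w ≤ 1 := by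
        intro w hw
        rw [hv] at hw
        exact hpre w (List.mem_of_mem_drop (List.mem_of_mem_take hw))
      have hcu : ∀ w ∈ collapse u, -2 ≤ w ∧ w ≤ 1 :=
        fun w hw => humem w (collapse_subset u w hw)
      have ih1 := ih lo mid (by omega) h0 hb1 (by omega) a b
      obtain ⟨A1, B1, hA1⟩ : ∃ A1 B1, (collapse u).foldl pyBumpA [a, b] = [A1, B1] :=
        ⟨_, _, bump_fold (collapse u) hcu a b⟩
      have ih2 := ih mid hi (by omega) (by omega) hb2 hhi A1 B1
      rw [hsplit, collapse_append u v hune hvne, hlast, hhead, List.foldl_append]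
      rw [ih1, hA1, ih2, ← hv]
      by_cases hsame : nums[(mid - 1).toNat] = nums[mid.toNat]
      · rw [hg1, hg2, if_pos hsame, if_pos hsame]
        obtain ⟨t', ht'⟩ := collapse_cons v.tail (nums[mid.toNat])
        have hvd : v = nums[mid.toNat] :: v.tail := by
          rw [← hhead]; exact (List.cons_head_tail hvne).symm
        have hcv : collapse v = nums[mid.toNat] :: t' := by
          calc collapse v = collapse (nums[mid.toNat] :: v.tail) := by rw [← hvd]
            _ = nums[mid.toNat] :: t' := ht'
        have ht'mem : ∀ w ∈ t', -2 ≤ w ∧ w ≤ 1 := by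
          intro w hw
          refine hvmem w (collapse_subset v w ?_)
          rw [hcv]
          exact List.mem_cons_of_mem _ hw
        rw [hcv, List.foldl_cons, List.tail_cons]
        exact drop_cancel (nums[mid.toNat]) (hpre _ (List.getElem_mem _)) t' ht'mem A1 B1
      · rw [hg1, hg2, if_neg hsame, if_neg hsame]
    · exfalso; omega

-- ===== VERDICT (by name: the statement is the Claim_ definition above) =====
theorem solutioin_spec : Claim_equal_solutioin := by
  intro nums _ hpre
  unfold Spec_solutioin
  cases nums with
  | nil => rfl
  | cons x xs =>
    show solutioin (x :: xs) = solutioin_alt (x :: xs)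
    unfold solutioin solutioin_alt
    simp only [PySem.List.len_eq]
    rw [if_neg (by simp only [List.length_cons]; push_cast; omega),
        if_pos (List.cons_ne_nil x xs)]
    rw [Afold_eq x xs, PySem.List.pyGetD_neg_one (x :: xs) 0 (List.cons_ne_nil x xs)]
    have hrepl : (List.replicate 2 (0 : Int)) = [0, 0] := rfl
    rw [hrepl, adj_fold_eq_filterMap pyBumpA xs x]
    rw [tallyB_eq (x :: xs) hpre (x :: xs).length 0 ((x :: xs).length : Int)
      (by omega) (by omega) (by simp only [List.length_cons]; push_cast; omega) (by omega) 0 0]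
    simp only [Int.toNat_zero, List.drop_zero]
    rw [show (((x :: xs).length : Int) - 0).toNat = (x :: xs).length by omega,
        List.take_length, collapse_eq_filterMap xs x]
    rfl
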